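-- pv_equiv track=rewrite | github.com/astrosmili/smili | smili/uvdata/uvtable/vistable.py | check_nontrivial
-- ===== SOURCE A (Python) =====
-- import itertools
--
-- def check_nontrivial(baselines, redundant):
--     if redundant is None:
--         return True
--
--     flag = False
--     for baseline, red in itertools.product(baselines, redundant):
--         flag |= (baseline[0] in red) and (baseline[1] in red)
--         if flag: break
--     return not flag
-- ===== SOURCE B (Python) =====
-- def check_nontrivial(baselines, redundant):
--     if redundant is None:
--         return True
--     groups = {}
--     for i, red in enumerate(redundant):
--         for node in red:
--             groups.setdefault(node, set()).add(i)
--     for u, v in baselines: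
--         if groups.get(u, set()) & groups.get(v, set()):
--             return False
--     return True
-- ===== Notes on version B (the rewrite author's own statement) =====
-- stated objective: alternative
-- what changed: Instead of scanning every (baseline, group) pair with linear membership tests, B indexes each node to the set of group ids containing it in one pass, then tests each baseline by a group-id set intersection; it trades A's early exit for the precomputed index.
import Mathlib
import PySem

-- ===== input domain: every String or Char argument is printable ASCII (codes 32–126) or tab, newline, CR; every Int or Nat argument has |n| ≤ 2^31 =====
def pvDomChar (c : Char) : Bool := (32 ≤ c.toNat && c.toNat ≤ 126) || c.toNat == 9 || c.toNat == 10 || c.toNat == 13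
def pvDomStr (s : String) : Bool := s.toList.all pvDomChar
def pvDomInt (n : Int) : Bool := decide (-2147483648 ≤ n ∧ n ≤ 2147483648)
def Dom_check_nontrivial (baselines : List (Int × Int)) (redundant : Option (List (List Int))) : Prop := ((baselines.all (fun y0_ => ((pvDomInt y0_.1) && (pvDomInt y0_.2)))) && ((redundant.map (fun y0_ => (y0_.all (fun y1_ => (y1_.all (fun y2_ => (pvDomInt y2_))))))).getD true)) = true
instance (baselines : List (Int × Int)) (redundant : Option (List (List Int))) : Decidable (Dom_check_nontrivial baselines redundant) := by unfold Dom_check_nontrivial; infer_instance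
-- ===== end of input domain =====

-- B is an alternative algorithm: one pass indexes each node to the set of group ids
-- containing it, then each baseline is checked by a group-id set intersection.

-- ===== PORT A =====
-- the loop body 'flag |= …; if flag: break' over itertools.product(baselines, redundant)
def pvLoopA (pairs : List ((Int × Int) × List Int)) (flag : Bool) : Bool :=
  match pairs with
  | [] => flag
  | p :: rest =>
      let flag := flag || (p.2.contains p.1.1 && p.2.contains p.1.2)
      if flag then flag else pvLoopA rest flag

def check_nontrivial (baselines : List (Int × Int)) (redundant : Option (List (List Int))) : Bool :=
  match redundant with
  | none => true
  | some reds =>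
      let flag := pvLoopA (baselines.flatMap (fun b => reds.map (fun r => (b, r)))) false
      !flag

-- ===== PORT B =====
-- groups.setdefault(node, set()).add(i) over 'for i, red in enumerate(redundant): for node in red'
def pvBuildGroups (reds : List (List Int)) : PySem.Dict Int (PySem.Set Int) :=
  (PySem.List.enumerate reds).foldl
    (fun d p => p.2.foldl (fun d node => d.modify node [] (fun s => PySem.Set.add s p.1)) d)
    PySem.Dict.empty

def check_nontrivial_alt (baselines : List (Int × Int)) (redundant : Option (List (List Int))) : Bool :=
  match redundant with
  | none => true
  | some reds =>
      let groups := pvBuildGroups reds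
      !(baselines.any (fun b =>
          !(PySem.Set.inter (groups.getD b.1 []) (groups.getD b.2 [])).isEmpty))

-- ===== PRECONDITION & SPEC =====
def Spec_check_nontrivial (baselines : List (Int × Int)) (redundant : Option (List (List Int))) (out : Bool) : Prop := out = check_nontrivial_alt baselines redundant
instance (baselines : List (Int × Int)) (redundant : Option (List (List Int))) (out : Bool) : Decidable (Spec_check_nontrivial baselines redundant out) := by unfold Spec_check_nontrivial; infer_instance

-- ===== CLAIM (what is proved, stated in full; the proofs are below) =====
def Claim_equal_check_nontrivial : Prop := ∀ (baselines : List (Int × Int)) (redundant : Option (List (List Int))), Dom_check_nontrivial baselines redundant → Spec_check_nontrivial baselines redundant (check_nontrivial baselines redundant)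

-- ===== LEMMAS AND PROOFS =====

-- A's break-loop computes 'any' over the remaining pairs
theorem pvLoopA_eq_any (pairs : List ((Int × Int) × List Int)) (flag : Bool) :
    pvLoopA pairs flag = (flag || pairs.any (fun p => p.2.contains p.1.1 && p.2.contains p.1.2)) := by
  induction pairs generalizing flag with
  | nil => simp [pvLoopA]
  | cons p rest ih =>
      simp only [pvLoopA, List.any_cons]
      cases flag <;> cases h : (p.2.contains p.1.1 && p.2.contains p.1.2) <;>
        simp [ih]

theorem pvSet_add_idem {s : PySem.Set Int} {x : Int} (h : x ∈ s) :
    PySem.Set.add s x = s := by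
  simp [PySem.Set.add, h]

-- inner loop of B's index-building pass
theorem pvBuild_inner (red : List Int) (i : Int) (d : PySem.Dict Int (PySem.Set Int)) (u : Int) :
    (red.foldl (fun d node => d.modify node [] (fun s => PySem.Set.add s i)) d).getD u []
      = (if u ∈ red then PySem.Set.add (d.getD u []) i else d.getD u []) := by
  induction red generalizing d with
  | nil => simp
  | cons x red ih =>
      simp only [List.foldl_cons, ih, List.mem_cons]
      by_cases hxu : u = x
      · subst hxu
        rw [PySem.Dict.getD_modify_self]
        by_cases hm : u ∈ red
        · simp [hm, pvSet_add_idem ((PySem.Set.mem_add _ _ _).mpr (Or.inr rfl))]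
        · simp [hm]
      · rw [PySem.Dict.getD_modify_of_ne]
        · simp [hxu]
        · exact hxu

-- membership characterisation of the built index
theorem pvBuildGroups_mem (reds : List (List Int)) (k : Int)
    (d : PySem.Dict Int (PySem.Set Int)) (u x : Int) :
    (x ∈ ((PySem.List.enumerate reds k).foldl
        (fun d p => p.2.foldl (fun d node => d.modify node [] (fun s => PySem.Set.add s p.1)) d)
        d).getD u [])
      ↔ (x ∈ d.getD u [] ∨ ∃ j : Nat, ∃ h : j < reds.length, x = k + j ∧ u ∈ reds[j]) := by
  induction reds generalizing k d with
  | nil => simp [PySem.List.enumerate]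
  | cons red reds ih =>
      rw [PySem.List.enumerate_cons]
      simp only [List.foldl_cons, ih, pvBuild_inner]
      constructor
      · rintro (h | ⟨j, hj, hx, hu⟩)
        · by_cases hm : u ∈ red
          · rw [if_pos hm] at h
            rcases (PySem.Set.mem_add _ _ _).mp h with h | h
            · exact Or.inl h
            · exact Or.inr ⟨0, by simp, by simpa using h, by simpa using hm⟩
          · rw [if_neg hm] at h; exact Or.inl h
        · refine Or.inr ⟨j + 1, by simp only [List.length_cons]; omega, ?_, by simpa using hu⟩
          push_cast at hx ⊢; omega
      · rintro (h | ⟨j, hj, hx, hu⟩)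
        · split
          · exact Or.inl ((PySem.Set.mem_add _ _ _).mpr (Or.inl h))
          · exact Or.inl h
        · cases j with
          | zero =>
              simp only [List.getElem_cons_zero] at hu
              left; rw [if_pos hu]
              exact (PySem.Set.mem_add _ _ _).mpr (Or.inr (by omega))
          | succ j =>
              right
              simp only [List.length_cons] at hj
              refine ⟨j, by omega, ?_, by simpa using hu⟩
              push_cast at hx ⊢; omega

theorem pvGroups_mem (reds : List (List Int)) (u x : Int) :
    x ∈ (pvBuildGroups reds).getD u []
      ↔ ∃ j : Nat, ∃ h : j < reds.length, x = (j : Int) ∧ u ∈ reds[j] := by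
  have := pvBuildGroups_mem reds 0 PySem.Dict.empty u x
  simpa [pvBuildGroups, PySem.List.enumerate] using this

-- per-baseline agreement of the two tests
theorem pvBaseline_eq (reds : List (List Int)) (u v : Int) :
    (reds.any (fun r => r.contains u && r.contains v))
      = !(PySem.Set.inter ((pvBuildGroups reds).getD u []) ((pvBuildGroups reds).getD v [])).isEmpty := by
  rw [Bool.eq_iff_iff]
  simp only [List.any_eq_true, Bool.and_eq_true, List.contains_eq_mem, decide_eq_true_eq,
    Bool.not_eq_true', List.isEmpty_eq_false_iff_exists_mem]
  constructor
  · rintro ⟨r, hr, hu, hv⟩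
    rcases List.mem_iff_getElem.mp hr with ⟨j, hj, rfl⟩
    exact ⟨(j : Int), (PySem.Set.mem_inter _ _ _).mpr
      ⟨(pvGroups_mem _ _ _).mpr ⟨j, hj, rfl, hu⟩, (pvGroups_mem _ _ _).mpr ⟨j, hj, rfl, hv⟩⟩⟩
  · rintro ⟨x, hx⟩
    rcases (PySem.Set.mem_inter _ _ _).mp hx with ⟨hxu, hxv⟩
    rcases (pvGroups_mem _ _ _).mp hxu with ⟨j, hj, hxj, hu⟩
    rcases (pvGroups_mem _ _ _).mp hxv with ⟨j', hj', hxj', hv⟩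
    have hjj : j' = j := by omega
    subst hjj
    exact ⟨reds[j'], List.getElem_mem hj, hu, hv⟩

-- ===== VERDICT (by name: the statement is the Claim_ definition above) =====
theorem check_nontrivial_spec : Claim_equal_check_nontrivial := by
  intro baselines redundant _
  unfold Spec_check_nontrivial check_nontrivial check_nontrivial_alt
  cases redundant with
  | none => rfl
  | some reds =>
      simp only [pvLoopA_eq_any, Bool.false_or, List.any_flatMap, List.any_map]
      congr 1
      refine PySem.List.any_congr_mem (fun b _ => ?_)
      simpa [Function.comp] using pvBaseline_eq reds b.1 b.2
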